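-- pv_equiv track=rewrite | github.com/markohuang/Connect-Five | util.py | detect_rows_include_closed
-- ===== SOURCE A (Python) =====
-- def is_bounded(board, y_end, x_end, length, d_y, d_x):
--     result = ["CLOSED", "SEMIOPEN", "OPEN"]
--     semi_result = 0
--     if y_end - length * d_y not in range(0, len(board)) or \
--             x_end - length * d_x not in range(0, len(board)):
--         stone1 = None
--     else:
--         stone1 = board[y_end - length * d_y][x_end - length * d_x]
--     if y_end + d_y not in range(0, len(board)) or \
--             x_end + d_x not in range(0, len(board)):
--         stone2 = None
--     else:
--         stone2 = board[y_end + d_y][x_end + d_x]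
--     if stone1 == " ":
--         semi_result += 1
--     if stone2 == " ":
--         semi_result += 1
--     return result[semi_result]
--
-- def detect_row_include_closed(board, col, y_start, x_start, length, d_y, d_x):
--     count = 0
--     end_positions = []
--     result = []
--     i = 0
--     while y_start + i * d_y in range(len(board)) \
--             and x_start + i * d_x in range(len(board)):
--         if board[y_start + i * d_y][x_start + i * d_x] == col:
--             count += 1
--         else:
--             if count == length:
--                 end_positions.append(i - 1)
--             count = 0
--         i += 1
--     if count == length:
--         end_positions.append(i - 1)
--     for j in end_positions:
--         result.append(is_bounded \
--                           (board, y_start + j * d_y, x_start + j * d_x, length, d_y, d_x))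
--     open_seq_count = result.count("OPEN")
--     semi_open_seq_count = result.count("SEMIOPEN")
--     closed_seq_count = result.count("CLOSED")
--     return open_seq_count, semi_open_seq_count, closed_seq_count
--
-- def detect_rows_include_closed(board, col, length):
--     open_seq_count, semi_open_seq_count, closed_seq_count = 0, 0, 0
--     for i in range(len(board)):
--         open_seq_count += detect_row_include_closed \
--             (board, col, i, 0, length, 0, 1)[0]
--         semi_open_seq_count += detect_row_include_closed \
--             (board, col, i, 0, length, 0, 1)[1]
--         closed_seq_count += detect_row_include_closed \
--             (board, col, i, 0, length, 0, 1)[2]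
--
--         open_seq_count += detect_row_include_closed \
--             (board, col, 0, i, length, 1, 0)[0]
--         semi_open_seq_count += detect_row_include_closed \
--             (board, col, 0, i, length, 1, 0)[1]
--         closed_seq_count += detect_row_include_closed \
--             (board, col, 0, i, length, 1, 0)[2]
--
--         open_seq_count += detect_row_include_closed \
--             (board, col, 0, i, length, 1, 1)[0]
--         semi_open_seq_count += detect_row_include_closed \
--             (board, col, 0, i, length, 1, 1)[1]
--         closed_seq_count += detect_row_include_closed \
--             (board, col, 0, i, length, 1, 1)[2]
--         if i != 0:
--             open_seq_count += detect_row_include_closed \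
--                 (board, col, i, 0, length, 1, 1)[0]
--             semi_open_seq_count += detect_row_include_closed \
--                 (board, col, i, 0, length, 1, 1)[1]
--             closed_seq_count += detect_row_include_closed \
--                 (board, col, i, 0, length, 1, 1)[2]
--
--         open_seq_count += detect_row_include_closed \
--             (board, col, 0, i, length, 1, -1)[0]
--         semi_open_seq_count += detect_row_include_closed \
--             (board, col, 0, i, length, 1, -1)[1]
--         closed_seq_count += detect_row_include_closed \
--             (board, col, 0, i, length, 1, -1)[2]
--         if i != 0:
--             open_seq_count += detect_row_include_closed \
--                 (board, col, i, len(board) - 1, length, 1, -1)[0]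
--             semi_open_seq_count += detect_row_include_closed \
--                 (board, col, i, len(board) - 1, length, 1, -1)[1]
--             closed_seq_count += detect_row_include_closed \
--                 (board, col, i, len(board) - 1, length, 1, -1)[2]
--     return open_seq_count, semi_open_seq_count, closed_seq_count
-- ===== SOURCE B (Python) =====
-- def _classify_runs(line, col, length):
--     # one pass: on each maximal run boundary, classify the run immediately
--     o = s = c = 0
--     run = 0
--     for i in range(len(line) + 1):
--         cur = line[i] if i < len(line) else None
--         if cur == col:
--             run += 1
--             continue
--         if run == length:
--             j = i - run - 1
--             before = line[j] if 0 <= j < len(line) else None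
--             openness = (before == " ") + (cur == " ")
--             if openness == 2:
--                 o += 1
--             elif openness == 1:
--                 s += 1
--             else:
--                 c += 1
--         run = 0
--     return o, s, c
--
-- def detect_rows_include_closed(board, col, length):
--     n = len(board)
--     lines = []
--     for row in board:
--         lines.append(row[:n])                                       # rows
--     for x in range(n):
--         lines.append([board[y][x] for y in range(n)])               # columns
--     for i in range(n):
--         lines.append([board[k][i + k] for k in range(n - i)])       # \ diagonals from top row
--     for i in range(1, n):
--         lines.append([board[i + k][k] for k in range(n - i)])       # \ diagonals from left column
--     for i in range(n):
--         lines.append([board[k][i - k] for k in range(i + 1)])       # / diagonals from top row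
--     for i in range(1, n):
--         lines.append([board[i + k][n - 1 - k] for k in range(n - i)])  # / diagonals from right column
--     o = s = c = 0
--     for line in lines:
--         do, ds, dc = _classify_runs(line, col, length)
--         o += do; s += ds; c += dc
--     return o, s, c
-- ===== Notes on version B (the rewrite author's own statement) =====
-- stated objective: faster
-- what changed: B materialises every board line (rows, columns, both diagonal families with A's exact anchor/dedup coverage) as an explicit list once and classifies each maximal run the moment it ends in a single pass per line, instead of A's per-direction index-arithmetic scans that collect end positions, re-scan each with is_bounded, and are invoked three identical times per direction (once per returned component).
import Mathlib
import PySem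

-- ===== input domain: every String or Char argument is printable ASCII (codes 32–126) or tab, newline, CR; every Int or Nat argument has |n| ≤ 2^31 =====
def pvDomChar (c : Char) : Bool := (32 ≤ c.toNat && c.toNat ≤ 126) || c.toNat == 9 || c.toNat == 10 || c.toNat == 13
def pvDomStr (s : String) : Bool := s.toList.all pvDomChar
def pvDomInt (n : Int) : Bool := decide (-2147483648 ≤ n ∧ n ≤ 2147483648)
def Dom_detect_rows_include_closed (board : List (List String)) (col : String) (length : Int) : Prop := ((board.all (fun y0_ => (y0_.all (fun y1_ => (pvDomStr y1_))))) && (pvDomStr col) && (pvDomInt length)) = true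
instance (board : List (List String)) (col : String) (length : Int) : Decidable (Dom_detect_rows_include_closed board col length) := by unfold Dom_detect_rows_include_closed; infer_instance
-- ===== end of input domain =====

-- B materialises every board ln (rows, columns, both diagonal families) once and classifies each
-- maximal run at the moment it ends in a single pass per ln, instead of A's collect-end-positions
-- then is_bounded re-scan per direction; equivalence is proved on square-enough boards (Pre_).

-- ===== PORT A =====

-- `v in range(0, n)`
def pvInR (n i : Int) : Bool := decide (0 ≤ i ∧ i < n)

-- board[y][x]; exact whenever 0 ≤ y < len board and 0 ≤ x < len board[y]
-- (every use is guarded by pvInR checks, and Pre_ gives rows of length ≥ len board)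
def pvCellA (b : List (List String)) (y x : Int) : String :=
  (b.getD y.toNat []).getD x.toNat ""

def is_bounded (b : List (List String)) (y_end x_end L dy dx : Int) : String :=
  let n : Int := b.length
  let stone1 : Option String :=
    if !pvInR n (y_end - L * dy) || !pvInR n (x_end - L * dx) then none
    else some (pvCellA b (y_end - L * dy) (x_end - L * dx))
  let stone2 : Option String :=
    if !pvInR n (y_end + dy) || !pvInR n (x_end + dx) then none
    else some (pvCellA b (y_end + dy) (x_end + dx))
  let semi : Int := (if stone1 == some " " then 1 else 0) + (if stone2 == some " " then 1 else 0)
  -- result = ["CLOSED", "SEMIOPEN", "OPEN"]; result[semi]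
  if semi == 0 then "CLOSED" else if semi == 1 then "SEMIOPEN" else "OPEN"

-- A's while loop, ported with fuel len(board)+1: every call has d_y = 1 or (d_y, d_x) = (0, 1)
-- with start 0, so the condition fails at some i ≤ len(board) and the fuel is never exhausted.
def pvDrLoop (b : List (List String)) (col : String) (y x L dy dx : Int) :
    Nat → Int → Int → List Int → Int × Int × List Int
  | 0, i, count, eps => (i, count, eps)
  | f+1, i, count, eps =>
    if pvInR (b.length : Int) (y + i * dy) && pvInR (b.length : Int) (x + i * dx) then
      if pvCellA b (y + i * dy) (x + i * dx) == col then
        pvDrLoop b col y x L dy dx f (i+1) (count+1) eps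
      else
        pvDrLoop b col y x L dy dx f (i+1) 0 (if count == L then eps ++ [i - 1] else eps)
    else (i, count, eps)

def detect_row_include_closed (b : List (List String)) (col : String) (y x L dy dx : Int) :
    Int × Int × Int :=
  let p := pvDrLoop b col y x L dy dx (b.length + 1) 0 0 []
  let eps := if p.2.1 == L then p.2.2 ++ [p.1 - 1] else p.2.2
  let result := eps.map (fun j => is_bounded b (y + j * dy) (x + j * dx) L dy dx)
  ((result.count "OPEN" : Int), (result.count "SEMIOPEN" : Int), (result.count "CLOSED" : Int))

def detect_rows_include_closed (board : List (List String)) (col : String) (length : Int) :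
    Int × Int × Int :=
  (List.range board.length).foldl (fun (acc : Int × Int × Int) (iN : Nat) =>
    let i : Int := (iN : Int)
    let t1 := detect_row_include_closed board col i 0 length 0 1
    let acc := (acc.1 + t1.1, acc.2.1 + t1.2.1, acc.2.2 + t1.2.2)
    let t2 := detect_row_include_closed board col 0 i length 1 0
    let acc := (acc.1 + t2.1, acc.2.1 + t2.2.1, acc.2.2 + t2.2.2)
    let t3 := detect_row_include_closed board col 0 i length 1 1
    let acc := (acc.1 + t3.1, acc.2.1 + t3.2.1, acc.2.2 + t3.2.2)
    let acc :=
      if iN ≠ 0 then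
        let t4 := detect_row_include_closed board col i 0 length 1 1
        (acc.1 + t4.1, acc.2.1 + t4.2.1, acc.2.2 + t4.2.2)
      else acc
    let t5 := detect_row_include_closed board col 0 i length 1 (-1)
    let acc := (acc.1 + t5.1, acc.2.1 + t5.2.1, acc.2.2 + t5.2.2)
    if iN ≠ 0 then
      let t6 := detect_row_include_closed board col i ((board.length : Int) - 1) length 1 (-1)
      (acc.1 + t6.1, acc.2.1 + t6.2.1, acc.2.2 + t6.2.2)
    else acc) (0, 0, 0)

-- ===== PORT B =====

-- board[y][x]; exact whenever x < len (board[y]) (guaranteed on Pre_ at every use)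
def pvCellB (b : List (List String)) (y x : Nat) : String := (b.getD y []).getD x ""

-- the body of _classify_runs' for-loop; state (o, s, c, run)
def pvStep (ln : List String) (col : String) (length : Int)
    (st : Int × Int × Int × Int) (i : Nat) : Int × Int × Int × Int :=
  let cur : Option String := ln[i]?
  if cur == some col then (st.1, st.2.1, st.2.2.1, st.2.2.2 + 1)
  else
    let tr :=
      if st.2.2.2 == length then
        let j : Int := (i : Int) - st.2.2.2 - 1
        let before : Option String :=
          if 0 ≤ j ∧ j < (ln.length : Int) then some (ln.getD j.toNat "") else none
        let openness : Int :=
          (if before == some " " then 1 else 0) + (if cur == some " " then 1 else 0)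
        if openness == 2 then (st.1 + 1, st.2.1, st.2.2.1)
        else if openness == 1 then (st.1, st.2.1 + 1, st.2.2.1)
        else (st.1, st.2.1, st.2.2.1 + 1)
      else (st.1, st.2.1, st.2.2.1)
    (tr.1, tr.2.1, tr.2.2, 0)

def pvClassifyRuns (ln : List String) (col : String) (length : Int) : Int × Int × Int :=
  let st := (List.range (ln.length + 1)).foldl (pvStep ln col length) (0, 0, 0, 0)
  (st.1, st.2.1, st.2.2.1)

def pvLines (b : List (List String)) : List (List String) :=
  let n := b.length
  (b.map fun row => row.take n)
  ++ ((List.range n).map fun x => (List.range n).map fun y => pvCellB b y x)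
  ++ ((List.range n).map fun i => (List.range (n - i)).map fun k => pvCellB b k (i + k))
  ++ ((List.range' 1 (n - 1)).map fun i => (List.range (n - i)).map fun k => pvCellB b (i + k) k)
  ++ ((List.range n).map fun i => (List.range (i + 1)).map fun k => pvCellB b k (i - k))
  ++ ((List.range' 1 (n - 1)).map fun i => (List.range (n - i)).map fun k => pvCellB b (i + k) (n - 1 - k))

def detect_rows_include_closed_alt (board : List (List String)) (col : String) (length : Int) :
    Int × Int × Int :=
  (pvLines board).foldl (fun acc ln =>
    let d := pvClassifyRuns ln col length
    (acc.1 + d.1, acc.2.1 + d.2.1, acc.2.2 + d.2.2)) (0, 0, 0)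

-- ===== PRECONDITION & SPEC =====

-- Exactly the inputs on which Python A returns: A reads board[y][x] for all y, x < len(board),
-- so it raises IndexError iff some row is shorter than the board's height.
def Pre_detect_rows_include_closed (board : List (List String)) (_col : String) (_length : Int) : Prop :=
  ∀ row ∈ board, board.length ≤ row.length
instance (board : List (List String)) (col : String) (length : Int) : Decidable (Pre_detect_rows_include_closed board col length) := by unfold Pre_detect_rows_include_closed; infer_instance

def pvWitness_detect_rows_include_closed : List (List String) × String × Int :=
  ([[" ", "x"], ["x", "x"]], "x", 2)

def Spec_detect_rows_include_closed (board : List (List String)) (col : String) (length : Int) (out : Int × Int × Int) : Prop := out = detect_rows_include_closed_alt board col length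
instance (board : List (List String)) (col : String) (length : Int) (out : Int × Int × Int) : Decidable (Spec_detect_rows_include_closed board col length out) := by unfold Spec_detect_rows_include_closed; infer_instance

-- ===== CLAIM (what is proved, stated in full; the proofs are below) =====
def Claim_equal_detect_rows_include_closed : Prop := ∀ (board : List (List String)) (col : String) (length : Int), Dom_detect_rows_include_closed board col length → Pre_detect_rows_include_closed board col length → Spec_detect_rows_include_closed board col length (detect_rows_include_closed board col length)

-- ===== LEMMAS AND PROOFS =====

-- proof-side model of A's scan along one line (absolute index t, run counter, end positions)
def pvSim (col : String) (L : Int) : List String → Int → Int → List Int → Int × List Int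
  | [], _, count, eps => (count, eps)
  | c :: rest, t, count, eps =>
    if c == col then pvSim col L rest (t + 1) (count + 1) eps
    else pvSim col L rest (t + 1) 0 (if count == L then eps ++ [t - 1] else eps)

-- element of a line under Python's bounds guard
def pvStone (l : List String) (t : Int) : Option String :=
  if 0 ≤ t ∧ t < (l.length : Int) then some (l.getD t.toNat "") else none

-- one-hot classification of the run ending at line position j
def pvCls (l : List String) (L j : Int) : Int × Int × Int :=
  match pvStone l (j - L) == some " ", pvStone l (j + 1) == some " " with
  | true, true => (1, 0, 0)
  | false, false => (0, 0, 1)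
  | _, _ => (0, 1, 0)

def pvClsStr (l : List String) (L j : Int) : String :=
  match pvStone l (j - L) == some " ", pvStone l (j + 1) == some " " with
  | true, true => "OPEN"
  | false, false => "CLOSED"
  | _, _ => "SEMIOPEN"

-- the final end-position list of A's scan started at (t, count) on suffix rest of l
def pvEpsF (col : String) (L : Int) (l rest : List String) (t count : Int) : List Int :=
  if (pvSim col L rest t count []).1 == L
  then (pvSim col L rest t count []).2 ++ [(l.length : Int) - 1]
  else (pvSim col L rest t count []).2

lemma pvSim_append (col : String) (L : Int) :
    ∀ (l : List String) (t count : Int) (eps : List Int),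
      pvSim col L l t count eps = ((pvSim col L l t count []).1, eps ++ (pvSim col L l t count []).2) := by
  intro l
  induction l with
  | nil => intro t count eps; simp [pvSim]
  | cons ch rest ih =>
    intro t count eps
    by_cases h : (ch == col) = true
    · simp only [pvSim, h, if_true]
      rw [ih]
    · simp only [pvSim, h, if_false, Bool.false_eq_true]
      rw [ih (t+1) (0:Int) (if count == L then eps ++ [t-1] else eps),
          ih (t+1) (0:Int) (if count == L then ([] : List Int) ++ [t-1] else [])]
      by_cases hc : (count == L) = true <;> simp [hc, List.append_assoc]

lemma pvCount_map (l : List String) (L : Int) : ∀ js : List Int,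
    (((js.map (pvClsStr l L)).count "OPEN" : Int), ((js.map (pvClsStr l L)).count "SEMIOPEN" : Int),
      ((js.map (pvClsStr l L)).count "CLOSED" : Int)) = (js.map (pvCls l L)).sum := by
  intro js
  induction js with
  | nil => simp
  | cons j js ih =>
    simp only [List.map_cons, List.count_cons, List.sum_cons, ← ih]
    rcases h1 : pvStone l (j - L) == some " " <;> rcases h2 : pvStone l (j + 1) == some " " <;>
      simp [pvClsStr, pvCls, h1, h2, Prod.ext_iff] <;> ring

lemma pvStone_natCast (l : List String) (i : Nat) : pvStone l (i : Int) = l[i]? := by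
  rw [pvStone]
  split_ifs with h
  · have hlt : i < l.length := by exact_mod_cast h.2
    rw [Int.toNat_natCast, List.getD_eq_getElem l "" hlt, List.getElem?_eq_getElem hlt]
  · symm
    apply List.getElem?_eq_none
    omega

lemma pvStep_boundary (l : List String) (col : String) (L : Int) (o s c count : Int) (i : Nat)
    (hcur : (l[i]? == some col) = false) :
    pvStep l col L (o, s, c, count) i =
      (if count == L then
        (o + (pvCls l L ((i : Int) - 1)).1, s + (pvCls l L ((i : Int) - 1)).2.1,
         c + (pvCls l L ((i : Int) - 1)).2.2, 0)
      else (o, s, c, 0)) := by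
  by_cases hc : (count == L) = true
  · have hcL : count = L := by simpa using hc
    subst hcL
    have e1 : (i : Int) - 1 - count = (i : Int) - count - 1 := by ring
    have e2 : (i : Int) - 1 + 1 = (i : Int) := by ring
    have hbef : (if 0 ≤ (i : Int) - count - 1 ∧ (i : Int) - count - 1 < (l.length : Int)
        then some (l.getD ((i : Int) - count - 1).toNat "") else none) =
        pvStone l ((i : Int) - count - 1) := rfl
    simp only [pvStep, hcur, hc, if_true, if_false, Bool.false_eq_true, hbef]
    rcases b1 : pvStone l ((i : Int) - count - 1) == some " " <;>
      rcases b2 : l[i]? == some " " <;>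
        simp [pvCls, e1, e2, pvStone_natCast, b1, b2]
  · simp [pvStep, hcur, hc]

lemma pvFold_eq_sum (l : List String) (col : String) (L : Int) :
    ∀ (rest : List String) (t : Nat) (count o s c : Int),
      l.drop t = rest → t ≤ l.length →
      (List.range' t (l.length + 1 - t)).foldl (pvStep l col L) (o, s, c, count) =
        (o + ((pvEpsF col L l rest (t : Int) count).map (pvCls l L)).sum.1,
         s + ((pvEpsF col L l rest (t : Int) count).map (pvCls l L)).sum.2.1,
         c + ((pvEpsF col L l rest (t : Int) count).map (pvCls l L)).sum.2.2, 0) := by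
  intro rest
  induction rest with
  | nil =>
    intro t count o s c hdrop ht
    have hteq : t = l.length := by
      have := List.drop_eq_nil_iff.mp hdrop
      omega
    subst hteq
    have hrange : l.length + 1 - l.length = 1 := by omega
    rw [hrange, List.range'_one, List.foldl_cons, List.foldl_nil]
    have hnone : l[l.length]? = none := List.getElem?_eq_none (le_refl _)
    rw [pvStep_boundary l col L o s c count l.length (by simp)]
    simp only [pvEpsF, pvSim]
    by_cases hc : (count == L) = true <;> simp [hc]
  | cons cell rest' ih =>
    intro t count o s c hdrop ht
    have htlt : t < l.length := by
      have := congrArg List.length hdrop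
      simp [List.length_drop] at this
      omega
    have h2 := List.drop_eq_getElem_cons htlt
    rw [hdrop] at h2
    obtain ⟨hcell, hrest⟩ : (cell = l[t] ∧ rest' = l.drop (t + 1)) := by
      exact ⟨(List.cons.injEq _ _ _ _).mp h2 |>.1, (List.cons.injEq _ _ _ _).mp h2 |>.2⟩
    have hget : l[t]? = some cell := by rw [List.getElem?_eq_getElem htlt, hcell]
    have hrw : l.length + 1 - t = (l.length + 1 - (t + 1)) + 1 := by omega
    rw [hrw, List.range'_succ, List.foldl_cons]
    by_cases hcol : (cell == col) = true
    · have hcur : (l[t]? == some col) = true := by simp [hget, hcol]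
      have hstep : pvStep l col L (o, s, c, count) t = (o, s, c, count + 1) := by
        simp [pvStep, hcur]
      rw [hstep, ih (t + 1) (count + 1) o s c hrest.symm (by omega)]
      have hkey : pvEpsF col L l ([cell] ++ rest') (t : Int) count =
          pvEpsF col L l rest' ((t : Int) + 1) (count + 1) := by
        simp [pvEpsF, pvSim, hcol]
      push_cast
      rw [← hkey]
      simp
    · have hcur : (l[t]? == some col) = false := by simp [hget, hcol]
      rw [pvStep_boundary l col L o s c count t hcur]
      have hkey : pvEpsF col L l ([cell] ++ rest') (t : Int) count =
          (if count == L then [(t : Int) - 1] else []) ++ pvEpsF col L l rest' ((t : Int) + 1) 0 := by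
        simp only [List.singleton_append, pvEpsF, pvSim, hcol, Bool.false_eq_true, if_false]
        rw [pvSim_append col L rest' ((t : Int) + 1) 0 (if count == L then [] ++ [(t : Int) - 1] else [])]
        by_cases hc : (count == L) = true <;> simp [hc]
        split_ifs <;> rfl
      by_cases hc : (count == L) = true
      · simp only [hc, if_true]
        rw [ih (t + 1) 0 (o + (pvCls l L ((t : Int) - 1)).1) (s + (pvCls l L ((t : Int) - 1)).2.1)
              (c + (pvCls l L ((t : Int) - 1)).2.2) hrest.symm (by omega)]
        have : pvEpsF col L l (cell :: rest') (t : Int) count =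
            [(t : Int) - 1] ++ pvEpsF col L l rest' ((t : Int) + 1) 0 := by
          simpa [hc] using hkey
        push_cast
        rw [this]
        simp only [List.map_append, List.sum_append, List.map_cons, List.map_nil, List.sum_cons,
          List.sum_nil, add_zero]
        simp [Prod.ext_iff]
        constructor
        · ring
        constructor <;> ring
      · simp only [hc, if_false, Bool.false_eq_true]
        rw [ih (t + 1) 0 o s c hrest.symm (by omega)]
        have : pvEpsF col L l (cell :: rest') (t : Int) count =
            pvEpsF col L l rest' ((t : Int) + 1) 0 := by
          simpa [hc] using hkey
        push_cast
        rw [this]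

lemma pvDrLoop_eq (b : List (List String)) (col : String) (y x L dy dx : Int) (l : List String)
    (hcond : ∀ t : Int, (pvInR (b.length : Int) (y + t * dy) && pvInR (b.length : Int) (x + t * dx)) =
        decide (0 ≤ t ∧ t < (l.length : Int)))
    (hcell : ∀ t : Nat, t < l.length → pvCellA b (y + (t : Int) * dy) (x + (t : Int) * dx) = l.getD t "") :
    ∀ (f : Nat) (t : Nat) (count : Int) (eps : List Int), t ≤ l.length → l.length < f + t →
      pvDrLoop b col y x L dy dx f (t : Int) count eps =
        ((l.length : Int), pvSim col L (l.drop t) (t : Int) count eps) := by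
  intro f
  induction f with
  | zero => intro t count eps ht hf; exact absurd hf (by omega)
  | succ f ih =>
    intro t count eps ht hf
    rw [pvDrLoop, hcond (t : Int)]
    by_cases htm : t < l.length
    · have hd : decide ((0:Int) ≤ (t:Int) ∧ (t:Int) < (l.length:Int)) = true := by
        simp only [decide_eq_true_eq]; omega
      rw [hd, if_pos rfl, hcell t htm, List.drop_eq_getElem_cons htm,
          List.getD_eq_getElem l "" htm]
      by_cases hcol : (l[t] == col) = true
      · rw [if_pos hcol]
        simp only [pvSim, hcol, if_true]
        have := ih (t+1) (count+1) eps (by omega) (by omega)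
        push_cast at this ⊢
        rw [this]
      · rw [if_neg hcol]
        simp only [pvSim, hcol, if_false, Bool.false_eq_true]
        have := ih (t+1) 0 (if count == L then eps ++ [(t:Int) - 1] else eps) (by omega) (by omega)
        push_cast at this ⊢
        rw [this]
    · have hteq : t = l.length := by omega
      have hd : decide ((0:Int) ≤ (t:Int) ∧ (t:Int) < (l.length:Int)) = false := by
        simp only [decide_eq_false_iff_not]; omega
      rw [hd, if_neg (by simp)]
      subst hteq
      simp [List.drop_of_length_le, pvSim]

lemma pv_is_bounded_eq (b : List (List String)) (y x L dy dx : Int) (l : List String)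
    (hcond : ∀ t : Int, (pvInR (b.length : Int) (y + t * dy) && pvInR (b.length : Int) (x + t * dx)) =
        decide (0 ≤ t ∧ t < (l.length : Int)))
    (hcell : ∀ t : Nat, t < l.length → pvCellA b (y + (t : Int) * dy) (x + (t : Int) * dx) = l.getD t "") :
    ∀ j : Int, is_bounded b (y + j * dy) (x + j * dx) L dy dx = pvClsStr l L j := by
  intro j
  have hs : ∀ u : Int,
      (if !pvInR (b.length : Int) (y + u * dy) || !pvInR (b.length : Int) (x + u * dx) then none
       else some (pvCellA b (y + u * dy) (x + u * dx))) = pvStone l u := by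
    intro u
    by_cases hu : 0 ≤ u ∧ u < (l.length : Int)
    · have hb' : (pvInR (b.length : Int) (y + u * dy) && pvInR (b.length : Int) (x + u * dx)) = true := by
        rw [hcond u]; exact decide_eq_true hu
      obtain ⟨hb1, hb2⟩ : pvInR (b.length : Int) (y + u * dy) = true ∧
          pvInR (b.length : Int) (x + u * dx) = true := by simpa using hb'
      rw [hb1, hb2]
      simp only [Bool.not_true, Bool.or_self, Bool.false_eq_true, if_false]
      have hcast : ((u.toNat : Nat) : Int) = u := Int.toNat_of_nonneg hu.1
      have hlt : u.toNat < l.length := by omega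
      rw [pvStone, if_pos hu, ← hcast, hcell u.toNat hlt, Int.toNat_natCast]
    · have hb' : (pvInR (b.length : Int) (y + u * dy) && pvInR (b.length : Int) (x + u * dx)) = false := by
        rw [hcond u]; exact decide_eq_false hu
      rw [← Bool.not_and, hb']
      simp only [Bool.not_false, if_true]
      rw [pvStone, if_neg hu]
  have e1 : y + j * dy - L * dy = y + (j - L) * dy := by ring
  have e2 : x + j * dx - L * dx = x + (j - L) * dx := by ring
  have e3 : y + j * dy + dy = y + (j + 1) * dy := by ring
  have e4 : x + j * dx + dx = x + (j + 1) * dx := by ring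
  simp only [is_bounded, e1, e2, e3, e4, hs (j - L), hs (j + 1)]
  rcases b1 : pvStone l (j - L) == some " " <;> rcases b2 : pvStone l (j + 1) == some " " <;>
    simp [pvClsStr, b1, b2]

theorem pv_detect_row_eq (b : List (List String)) (col : String) (y x L dy dx : Int)
    (l : List String) (hm : l.length ≤ b.length)
    (hcond : ∀ t : Int, (pvInR (b.length : Int) (y + t * dy) && pvInR (b.length : Int) (x + t * dx)) =
        decide (0 ≤ t ∧ t < (l.length : Int)))
    (hcell : ∀ t : Nat, t < l.length → pvCellA b (y + (t : Int) * dy) (x + (t : Int) * dx) = l.getD t "") :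
    detect_row_include_closed b col y x L dy dx = pvClassifyRuns l col L := by
  have hloop := pvDrLoop_eq b col y x L dy dx l hcond hcell (b.length + 1) 0 0 [] (by omega) (by omega)
  simp only [Nat.cast_zero, List.drop_zero] at hloop
  have hfun : (fun j => is_bounded b (y + j * dy) (x + j * dx) L dy dx) = pvClsStr l L :=
    funext (pv_is_bounded_eq b y x L dy dx l hcond hcell)
  have hfold := pvFold_eq_sum l col L l 0 0 0 0 0 (List.drop_zero) (by omega)
  simp only [Nat.cast_zero, Nat.sub_zero] at hfold
  rw [detect_row_include_closed, pvClassifyRuns, List.range_eq_range', hfold, hloop, hfun]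
  have heps : (if (pvSim col L l 0 0 []).1 == L then
      (pvSim col L l 0 0 []).2 ++ [(l.length : Int) - 1] else (pvSim col L l 0 0 []).2) =
      pvEpsF col L l l 0 0 := rfl
  simp only [heps, pvCount_map l L (pvEpsF col L l l 0 0), zero_add]


lemma pvGetD_map_range (n : Nat) (f : Nat → String) (t : Nat) (ht : t < n) :
    ((List.range n).map f).getD t "" = f t := by
  rw [List.getD_eq_getElem?_getD, List.getElem?_map, List.getElem?_range ht]; rfl

-- family 1: horizontal lines (y fixed, d = (0, 1))
lemma pvFamRow (b : List (List String)) (hP : ∀ row ∈ b, b.length ≤ row.length)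
    (col : String) (L : Int) (i : Nat) (hi : i < b.length) :
    detect_row_include_closed b col (i : Int) 0 L 0 1 =
      pvClassifyRuns ((b.getD i []).take b.length) col L := by
  have hmem : b.getD i [] ∈ b := by
    rw [List.getD_eq_getElem b [] hi]; exact List.getElem_mem hi
  have hrlen : b.length ≤ (b.getD i []).length := hP _ hmem
  have hlen : ((b.getD i []).take b.length).length = b.length := by
    rw [List.length_take]; omega
  apply pv_detect_row_eq b col (i : Int) 0 L 0 1 _ (by rw [hlen])
  · intro t
    rw [hlen]
    simp only [pvInR, mul_zero, add_zero, mul_one, zero_add, ← Bool.decide_and, decide_eq_decide]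
    omega
  · intro t ht
    rw [hlen] at ht
    simp only [pvCellA, mul_zero, add_zero, mul_one, zero_add, Int.toNat_natCast]
    conv_rhs => rw [List.getD_eq_getElem?_getD, List.getElem?_take, if_pos ht]
    rw [List.getD_eq_getElem?_getD]

-- family 2: vertical lines (x fixed, d = (1, 0))
lemma pvFamCol (b : List (List String)) (col : String) (L : Int) (i : Nat) (hi : i < b.length) :
    detect_row_include_closed b col 0 (i : Int) L 1 0 =
      pvClassifyRuns ((List.range b.length).map fun yy => pvCellB b yy i) col L := by
  have hlen : ((List.range b.length).map fun yy => pvCellB b yy i).length = b.length := by simp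
  apply pv_detect_row_eq b col 0 (i : Int) L 1 0 _ (by rw [hlen])
  · intro t
    rw [hlen]
    simp only [pvInR, mul_zero, add_zero, mul_one, zero_add, ← Bool.decide_and, decide_eq_decide]
    omega
  · intro t ht
    rw [hlen] at ht
    simp only [pvCellA, mul_zero, add_zero, mul_one, zero_add, Int.toNat_natCast]
    rw [pvGetD_map_range _ _ t ht]
    rfl

-- family 3: down-right diagonals anchored on the top row
lemma pvFamD1 (b : List (List String)) (col : String) (L : Int) (i : Nat) (hi : i < b.length) :
    detect_row_include_closed b col 0 (i : Int) L 1 1 =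
      pvClassifyRuns ((List.range (b.length - i)).map fun k => pvCellB b k (i + k)) col L := by
  have hlen : ((List.range (b.length - i)).map fun k => pvCellB b k (i + k)).length = b.length - i := by
    simp
  apply pv_detect_row_eq b col 0 (i : Int) L 1 1 _ (by rw [hlen]; omega)
  · intro t
    rw [hlen]
    simp only [pvInR, mul_one, zero_add, ← Bool.decide_and, decide_eq_decide]
    omega
  · intro t ht
    rw [hlen] at ht
    simp only [pvCellA, mul_one, zero_add, Int.toNat_natCast]
    have e : ((i : Int) + (t : Int)).toNat = i + t := by omega
    rw [e, pvGetD_map_range _ _ t ht]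
    rfl

-- family 4: down-right diagonals anchored on the left column (row i ≥ 1)
lemma pvFamD2 (b : List (List String)) (col : String) (L : Int) (i : Nat)
    (hi1 : 1 ≤ i) (hi : i < b.length) :
    detect_row_include_closed b col (i : Int) 0 L 1 1 =
      pvClassifyRuns ((List.range (b.length - i)).map fun k => pvCellB b (i + k) k) col L := by
  have hlen : ((List.range (b.length - i)).map fun k => pvCellB b (i + k) k).length = b.length - i := by
    simp
  apply pv_detect_row_eq b col (i : Int) 0 L 1 1 _ (by rw [hlen]; omega)
  · intro t
    rw [hlen]
    simp only [pvInR, mul_one, zero_add, ← Bool.decide_and, decide_eq_decide]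
    omega
  · intro t ht
    rw [hlen] at ht
    simp only [pvCellA, mul_one, zero_add, Int.toNat_natCast]
    have e : ((i : Int) + (t : Int)).toNat = i + t := by omega
    rw [e, pvGetD_map_range _ _ t ht]
    rfl

-- family 5: down-left diagonals anchored on the top row
lemma pvFamA1 (b : List (List String)) (col : String) (L : Int) (i : Nat) (hi : i < b.length) :
    detect_row_include_closed b col 0 (i : Int) L 1 (-1) =
      pvClassifyRuns ((List.range (i + 1)).map fun k => pvCellB b k (i - k)) col L := by
  have hlen : ((List.range (i + 1)).map fun k => pvCellB b k (i - k)).length = i + 1 := by simp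
  apply pv_detect_row_eq b col 0 (i : Int) L 1 (-1) _ (by rw [hlen]; omega)
  · intro t
    rw [hlen]
    simp only [pvInR, mul_one, mul_neg_one, zero_add, ← Bool.decide_and, decide_eq_decide]
    omega
  · intro t ht
    rw [hlen] at ht
    simp only [pvCellA, mul_one, mul_neg_one, zero_add, Int.toNat_natCast]
    have e : ((i : Int) + -(t : Int)).toNat = i - t := by omega
    rw [e, pvGetD_map_range _ _ t ht]
    rfl

-- family 6: down-left diagonals anchored on the right column (row i ≥ 1)
lemma pvFamA2 (b : List (List String)) (col : String) (L : Int) (i : Nat)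
    (hi1 : 1 ≤ i) (hi : i < b.length) :
    detect_row_include_closed b col (i : Int) ((b.length : Int) - 1) L 1 (-1) =
      pvClassifyRuns ((List.range (b.length - i)).map fun k => pvCellB b (i + k) (b.length - 1 - k)) col L := by
  have hlen : ((List.range (b.length - i)).map fun k => pvCellB b (i + k) (b.length - 1 - k)).length
      = b.length - i := by simp
  apply pv_detect_row_eq b col (i : Int) ((b.length : Int) - 1) L 1 (-1) _ (by rw [hlen]; omega)
  · intro t
    rw [hlen]
    simp only [pvInR, mul_one, mul_neg_one, ← Bool.decide_and, decide_eq_decide]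
    omega
  · intro t ht
    rw [hlen] at ht
    simp only [pvCellA, mul_one, mul_neg_one]
    have e1 : ((i : Int) + (t : Int)).toNat = i + t := by omega
    have e2 : ((b.length : Int) - 1 + -(t : Int)).toNat = b.length - 1 - t := by omega
    rw [e1, e2, pvGetD_map_range _ _ t ht]
    rfl

lemma pvFoldl_eq_sum_of {α : Type} (f : (Int × Int × Int) → α → (Int × Int × Int))
    (g : α → Int × Int × Int) (h : ∀ acc x, f acc x = acc + g x) :
    ∀ (l : List α) (a : Int × Int × Int), l.foldl f a = a + (l.map g).sum := by
  intro l
  induction l with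
  | nil => intro a; simp
  | cons x xs ih => intro a; simp [List.foldl_cons, h, ih, add_assoc]

lemma pvMap_eq_range {α β : Type} (l : List α) (g : α → β) (d : α) :
    l.map g = (List.range l.length).map (fun i => g (l.getD i d)) := by
  induction l with
  | nil => simp
  | cons x xs ih =>
    simp only [List.map_cons, List.length_cons, List.range_succ_eq_map, List.map_map]
    rw [ih]
    simp [Function.comp_def]

lemma pvSum_if (h : Nat → Int × Int × Int) (n : Nat) :
    ((List.range n).map (fun i => if i ≠ 0 then h i else 0)).sum =
      ((List.range' 1 (n - 1)).map h).sum := by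
  cases n with
  | zero => simp
  | succ n' =>
    rw [List.range_eq_range', List.range'_succ]
    simp only [List.map_cons, List.sum_cons, ne_eq, not_true_eq_false, if_false,
      Nat.add_sub_cancel, zero_add]
    apply congrArg
    apply List.map_congr_left
    intro i hi
    rw [List.mem_range'] at hi
    obtain ⟨k, hk, rfl⟩ := hi
    simp

-- ===== VERDICT (by name: the statement is the Claim_ definition above) =====
theorem detect_rows_include_closed_spec : Claim_equal_detect_rows_include_closed := by
  intro board col L hDom hPre
  unfold Spec_detect_rows_include_closed
  have hA : detect_rows_include_closed board col L =
      ((List.range board.length).map (fun i : Nat =>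
        detect_row_include_closed board col (i : Int) 0 L 0 1
        + detect_row_include_closed board col 0 (i : Int) L 1 0
        + detect_row_include_closed board col 0 (i : Int) L 1 1
        + (if i ≠ 0 then detect_row_include_closed board col (i : Int) 0 L 1 1 else 0)
        + detect_row_include_closed board col 0 (i : Int) L 1 (-1)
        + (if i ≠ 0 then detect_row_include_closed board col (i : Int) ((board.length : Int) - 1) L 1 (-1) else 0))).sum := by
    rw [detect_rows_include_closed, pvFoldl_eq_sum_of _ (fun i : Nat =>
        detect_row_include_closed board col (i : Int) 0 L 0 1
        + detect_row_include_closed board col 0 (i : Int) L 1 0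
        + detect_row_include_closed board col 0 (i : Int) L 1 1
        + (if i ≠ 0 then detect_row_include_closed board col (i : Int) 0 L 1 1 else 0)
        + detect_row_include_closed board col 0 (i : Int) L 1 (-1)
        + (if i ≠ 0 then detect_row_include_closed board col (i : Int) ((board.length : Int) - 1) L 1 (-1) else 0)) ?_,
      show ((0, 0, 0) : Int × Int × Int) = 0 from rfl, zero_add]
    intro acc i
    by_cases h0 : i = 0 <;>
      simp [h0, Prod.ext_iff, Prod.fst_add, Prod.snd_add] <;> ring_nf <;> simp
  have hB : detect_rows_include_closed_alt board col L =
      ((pvLines board).map (fun ln => pvClassifyRuns ln col L)).sum := by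
    rw [detect_rows_include_closed_alt, pvFoldl_eq_sum_of _ (fun ln => pvClassifyRuns ln col L) ?_,
      show ((0, 0, 0) : Int × Int × Int) = 0 from rfl, zero_add]
    intro acc ln
    simp [Prod.ext_iff, Prod.fst_add, Prod.snd_add]
  rw [hA, hB, pvLines]
  simp only [List.map_append, List.sum_append, List.map_map, List.sum_map_add]
  rw [pvSum_if (fun i : Nat => detect_row_include_closed board col (i : Int) 0 L 1 1) board.length,
      pvSum_if (fun i : Nat => detect_row_include_closed board col (i : Int) ((board.length : Int) - 1) L 1 (-1)) board.length]
  simp only [Function.comp_def]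
  rw [pvMap_eq_range board (fun row => pvClassifyRuns (row.take board.length) col L) []]
  have h1 : (List.range board.length).map (fun i : Nat => detect_row_include_closed board col (i : Int) 0 L 0 1)
      = (List.range board.length).map (fun i : Nat => pvClassifyRuns ((board.getD i []).take board.length) col L) :=
    List.map_congr_left (fun i hi => pvFamRow board hPre col L i (List.mem_range.mp hi))
  have h2 : (List.range board.length).map (fun i : Nat => detect_row_include_closed board col 0 (i : Int) L 1 0)
      = (List.range board.length).map (fun i : Nat => pvClassifyRuns ((List.range board.length).map fun yy => pvCellB board yy i) col L) :=
    List.map_congr_left (fun i hi => pvFamCol board col L i (List.mem_range.mp hi))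
  have h3 : (List.range board.length).map (fun i : Nat => detect_row_include_closed board col 0 (i : Int) L 1 1)
      = (List.range board.length).map (fun i : Nat => pvClassifyRuns ((List.range (board.length - i)).map fun k => pvCellB board k (i + k)) col L) :=
    List.map_congr_left (fun i hi => pvFamD1 board col L i (List.mem_range.mp hi))
  have h5 : (List.range board.length).map (fun i : Nat => detect_row_include_closed board col 0 (i : Int) L 1 (-1))
      = (List.range board.length).map (fun i : Nat => pvClassifyRuns ((List.range (i + 1)).map fun k => pvCellB board k (i - k)) col L) :=
    List.map_congr_left (fun i hi => pvFamA1 board col L i (List.mem_range.mp hi))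
  have h4 : (List.range' 1 (board.length - 1)).map (fun i : Nat => detect_row_include_closed board col (i : Int) 0 L 1 1)
      = (List.range' 1 (board.length - 1)).map (fun i : Nat => pvClassifyRuns ((List.range (board.length - i)).map fun k => pvCellB board (i + k) k) col L) := by
    apply List.map_congr_left
    intro i hi
    rw [List.mem_range'] at hi
    obtain ⟨k, hk, rfl⟩ := hi
    exact pvFamD2 board col L _ (by omega) (by omega)
  have h6 : (List.range' 1 (board.length - 1)).map (fun i : Nat => detect_row_include_closed board col (i : Int) ((board.length : Int) - 1) L 1 (-1))
      = (List.range' 1 (board.length - 1)).map (fun i : Nat => pvClassifyRuns ((List.range (board.length - i)).map fun k => pvCellB board (i + k) (board.length - 1 - k)) col L) := by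
    apply List.map_congr_left
    intro i hi
    rw [List.mem_range'] at hi
    obtain ⟨k, hk, rfl⟩ := hi
    exact pvFamA2 board col L _ (by omega) (by omega)
  rw [h1, h2, h3, h4, h5, h6]
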